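-- pv_equiv track=rewrite | github.com/neuroailab/unsup_vvs | unsup_vvs/network_training/models/network_cfg_scripts/shared_funcs.py | get_resnet_basicblock
-- ===== SOURCE A (Python) =====
-- def get_resnet_basicblock_one_layer(num_unit):
--     return {
--             "ResBlock":[
--                 {
--                     "filter_size":3,
--                     "stride":1,
--                     "num_filters":num_unit,
--                     "bn":1},
--                 {
--                     "filter_size":3,
--                     "stride":1,
--                     "num_filters":num_unit,
--                     "bn":1}]
--             }
--
-- def get_resnet_basicblock(
--         num_layers=[3, 4, 6, 3],
--         num_units=[64, 128, 256, 512],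
--         ):
--     # Build ResNet network configs according to the setting
--     # Default parameter is for resnet34
--     # Returns a list of dictionaries
--     ret_list = []
--     first_flag = True
--     for num_layer, num_unit in zip(num_layers, num_units):
--         now_first = True
--         for _ in range(num_layer):
--             curr_layer = get_resnet_basicblock_one_layer(num_unit)
--             if now_first and not first_flag:
--                 curr_layer['ResBlock'][0]['stride'] = 2
--             ret_list.append(curr_layer)
--             now_first = False
--             first_flag = False
--     return ret_list
-- ===== SOURCE B (Python) =====
-- def get_resnet_basicblock_one_layer(num_unit):
--     return {
--             "ResBlock":[
--                 {
--                     "filter_size":3,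
--                     "stride":1,
--                     "num_filters":num_unit,
--                     "bn":1},
--                 {
--                     "filter_size":3,
--                     "stride":1,
--                     "num_filters":num_unit,
--                     "bn":1}]
--             }
--
-- def get_resnet_basicblock(
--         num_layers=[3, 4, 6, 3],
--         num_units=[64, 128, 256, 512],
--         ):
--     # Build-then-fixup: first emit every block with stride 1 while recording
--     # the output index where each (non-empty) stage's first block lands,
--     # then set stride 2 on those stage-start blocks except the very first.
--     ret_list = []
--     starts = []
--     for num_layer, num_unit in zip(num_layers, num_units):
--         if num_layer > 0:
--             starts.append(len(ret_list))
--         ret_list.extend(get_resnet_basicblock_one_layer(num_unit)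
--                         for _ in range(num_layer))
--     for idx in starts[1:]:
--         ret_list[idx]['ResBlock'][0]['stride'] = 2
--     return ret_list
-- ===== Notes on version B (the rewrite author's own statement) =====
-- stated objective: alternative
-- what changed: Replaces A's two interleaved boolean flags (now_first/first_flag) inside the emission loop by a build-then-fixup decomposition: one pass emits every block with stride 1 and records each non-empty stage's start index, then a second pass patches stride 2 at the recorded indices except the first.
import Mathlib
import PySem

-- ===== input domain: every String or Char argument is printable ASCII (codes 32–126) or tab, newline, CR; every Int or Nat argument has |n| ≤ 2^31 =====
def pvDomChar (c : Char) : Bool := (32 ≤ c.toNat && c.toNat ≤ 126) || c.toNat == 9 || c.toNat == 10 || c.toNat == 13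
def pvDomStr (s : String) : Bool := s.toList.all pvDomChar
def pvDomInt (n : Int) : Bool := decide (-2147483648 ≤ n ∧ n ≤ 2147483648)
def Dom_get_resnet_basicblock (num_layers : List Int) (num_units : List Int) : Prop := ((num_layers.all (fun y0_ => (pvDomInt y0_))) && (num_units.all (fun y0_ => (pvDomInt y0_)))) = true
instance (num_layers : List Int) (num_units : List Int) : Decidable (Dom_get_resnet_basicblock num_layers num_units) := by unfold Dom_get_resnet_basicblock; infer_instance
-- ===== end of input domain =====

-- B replaces A's two interleaved boolean first-block flags by a build-then-fixup
-- decomposition (emit all blocks with stride 1, then patch stride 2 at the recorded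
-- stage-start indices except the first); objective: alternative decomposition.

abbrev PvBlock := List (String × List (List (String × Int)))

-- ===== PORT A =====
-- shared helper (it exists verbatim in both Pythons)
def get_resnet_basicblock_one_layer (num_unit : Int) : PvBlock :=
  [("ResBlock",
    [[("filter_size", 3), ("stride", 1), ("num_filters", num_unit), ("bn", 1)],
     [("filter_size", 3), ("stride", 1), ("num_filters", num_unit), ("bn", 1)]])]

-- dict assignment d[k] = v on a duplicate-free association list (overwrite in place, append if new) — exact
def pvDictSet (d : List (String × Int)) (k : String) (v : Int) : List (String × Int) :=
  match d with
  | [] => [(k, v)]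
  | p :: rest => if p.1 == k then (k, v) :: rest else p :: pvDictSet rest k v

-- curr_layer['ResBlock'][0]['stride'] = 2  — the key "ResBlock" and index 0 always exist on the
-- dicts this is applied to (they come from get_resnet_basicblock_one_layer), so the [] fallbacks
-- (Python's KeyError/IndexError) are unreachable
def pvSetFirstStride2 (d : PvBlock) : PvBlock :=
  match d with
  | [] => []
  | p :: rest =>
      if p.1 == "ResBlock" then
        (p.1, match p.2 with
              | [] => []
              | b0 :: bs => pvDictSet b0 "stride" 2 :: bs) :: rest
      else p :: pvSetFirstStride2 rest

-- body of A's inner 'for _ in range(num_layer)' loop; state = (ret_list, now_first, first_flag)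
def pvInnerStep (num_unit : Int) (st : List PvBlock × Bool × Bool) (_ : Int) :
    List PvBlock × Bool × Bool :=
  let curr := get_resnet_basicblock_one_layer num_unit
  let curr := if st.2.1 && !st.2.2 then pvSetFirstStride2 curr else curr
  (st.1 ++ [curr], false, false)

-- body of A's outer loop; state = (ret_list, first_flag)
def pvStepA (st : List PvBlock × Bool) (p : Int × Int) : List PvBlock × Bool :=
  let inner := (PySem.List.pyRange 0 p.1 1).foldl (pvInnerStep p.2) (st.1, true, st.2)
  (inner.1, inner.2.2)

def get_resnet_basicblock (num_layers : List Int) (num_units : List Int) : List PvBlock :=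
  ((num_layers.zip num_units).foldl pvStepA ([], true)).1

-- ===== PORT B =====
-- body of B's first pass; state = (ret_list, starts)
def pvStepB (st : List PvBlock × List Int) (p : Int × Int) : List PvBlock × List Int :=
  ((st.1 ++ (PySem.List.pyRange 0 p.1 1).map (fun _ => get_resnet_basicblock_one_layer p.2)),
   if 0 < p.1 then st.2 ++ [(st.1.length : Int)] else st.2)

-- body of B's fixup pass: ret_list[idx]['ResBlock'][0]['stride'] = 2 (idx is always in range:
-- it was recorded as len(ret_list) just before at least one block was appended)
def pvFix (l : List PvBlock) (idx : Int) : List PvBlock :=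
  match PySem.List.pyGet? l idx with
  | some b => l.set idx.toNat (pvSetFirstStride2 b)
  | none => l

def get_resnet_basicblock_alt (num_layers : List Int) (num_units : List Int) : List PvBlock :=
  let built := (num_layers.zip num_units).foldl pvStepB ([], [])
  (built.2.drop 1).foldl pvFix built.1

-- ===== PRECONDITION & SPEC =====
def Spec_get_resnet_basicblock (num_layers : List Int) (num_units : List Int) (out : List (List (String × List (List (String × Int))))) : Prop := out = get_resnet_basicblock_alt num_layers num_units
instance (num_layers : List Int) (num_units : List Int) (out : List (List (String × List (List (String × Int))))) : Decidable (Spec_get_resnet_basicblock num_layers num_units out) := by unfold Spec_get_resnet_basicblock; infer_instance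

-- ===== CLAIM (what is proved, stated in full; the proofs are below) =====
def Claim_equal_get_resnet_basicblock : Prop := ∀ (num_layers : List Int) (num_units : List Int), Dom_get_resnet_basicblock num_layers num_units → Spec_get_resnet_basicblock num_layers num_units (get_resnet_basicblock num_layers num_units)

-- ===== LEMMAS AND PROOFS =====

-- a stage-start block after the fixup
def pvBlk2 (num_unit : Int) : PvBlock :=
  [("ResBlock",
    [[("filter_size", 3), ("stride", 2), ("num_filters", num_unit), ("bn", 1)],
     [("filter_size", 3), ("stride", 1), ("num_filters", num_unit), ("bn", 1)]])]

lemma pvSetFirstStride2_one_layer (u : Int) :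
    pvSetFirstStride2 (get_resnet_basicblock_one_layer u) = pvBlk2 u := rfl

-- common characterisation of the output, by stages, with the pending first_flag
def pvCore : List (Int × Int) → Bool → List PvBlock
  | [], _ => []
  | (n, u) :: r, ff =>
      if 0 < n then
        (if ff then get_resnet_basicblock_one_layer u else pvBlk2 u) ::
          (List.replicate (n - 1).toNat (get_resnet_basicblock_one_layer u) ++ pvCore r false)
      else pvCore r ff

-- B's first pass, by stages
def pvBuild : List (Int × Int) → List PvBlock
  | [] => []
  | (n, u) :: r => List.replicate n.toNat (get_resnet_basicblock_one_layer u) ++ pvBuild r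

def pvStarts (k : Int) : List (Int × Int) → List Int
  | [] => []
  | (n, _) :: r => if 0 < n then k :: pvStarts (k + n) r else pvStarts k r

lemma pvInner_false (u : Int) (l : List Int) (acc : List PvBlock) :
    l.foldl (pvInnerStep u) (acc, false, false)
      = (acc ++ List.replicate l.length (get_resnet_basicblock_one_layer u), false, false) := by
  induction l generalizing acc with
  | nil => simp
  | cons x t ih =>
      simp [List.foldl_cons, pvInnerStep, ih, List.replicate_succ]

lemma pvInner_start (u n : Int) (ff : Bool) (acc : List PvBlock) :
    (PySem.List.pyRange 0 n 1).foldl (pvInnerStep u) (acc, true, ff)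
      = if 0 < n then
          (acc ++ (if ff then get_resnet_basicblock_one_layer u else pvBlk2 u) ::
            List.replicate (n - 1).toNat (get_resnet_basicblock_one_layer u), false, false)
        else (acc, true, ff) := by
  by_cases h : 0 < n
  · rw [PySem.List.pyRange_one_cons h]
    simp only [List.foldl_cons]
    have h1 : pvInnerStep u (acc, true, ff) 0
        = (acc ++ [if ff then get_resnet_basicblock_one_layer u else pvBlk2 u], false, false) := by
      cases ff <;> simp [pvInnerStep, pvSetFirstStride2_one_layer]
    rw [h1, pvInner_false, PySem.List.length_pyRange_one]
    simp [h, List.append_assoc]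
  · rw [PySem.List.pyRange_one_eq_nil (by omega)]
    simp [h]

lemma pvA_fold (zs : List (Int × Int)) (acc : List PvBlock) (ff : Bool) :
    zs.foldl pvStepA (acc, ff)
      = (acc ++ pvCore zs ff, ff && zs.all (fun p => decide (p.1 ≤ 0))) := by
  induction zs generalizing acc ff with
  | nil => simp [pvCore]
  | cons p r ih =>
      obtain ⟨n, u⟩ := p
      by_cases h : 0 < n
      · simp only [List.foldl_cons, pvStepA, pvInner_start, h, if_pos]
        rw [ih]
        simp [pvCore, h, List.append_assoc]
      · simp only [List.foldl_cons, pvStepA, pvInner_start, h, if_false]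
        rw [ih]
        have hn : n ≤ 0 := by omega
        simp [pvCore, h, hn]
  
lemma pvB_fold (zs : List (Int × Int)) (acc : List PvBlock) (ss : List Int) :
    zs.foldl pvStepB (acc, ss)
      = (acc ++ pvBuild zs, ss ++ pvStarts (acc.length : Int) zs) := by
  induction zs generalizing acc ss with
  | nil => simp [pvBuild, pvStarts]
  | cons p r ih =>
      obtain ⟨n, u⟩ := p
      have hmap : (PySem.List.pyRange 0 n 1).map (fun _ => get_resnet_basicblock_one_layer u)
          = List.replicate n.toNat (get_resnet_basicblock_one_layer u) := by
        rw [List.map_const']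
        rw [PySem.List.length_pyRange_one]
        norm_num
      by_cases h : 0 < n
      · simp only [List.foldl_cons, pvStepB, h, if_pos, hmap]
        rw [ih]
        have hlen : ((acc ++ List.replicate n.toNat (get_resnet_basicblock_one_layer u)).length : Int)
            = (acc.length : Int) + n := by
          simp [List.length_append]
          omega
        rw [hlen]
        simp [pvBuild, pvStarts, h, List.append_assoc]
      · simp only [List.foldl_cons, pvStepB, h, if_false, hmap]
        rw [ih]
        have : n.toNat = 0 := by omega
        simp [pvBuild, pvStarts, h, this]

lemma pvSet_append (pre : List PvBlock) (x : PvBlock) (t : List PvBlock) (y : PvBlock) :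
    (pre ++ x :: t).set pre.length y = pre ++ y :: t := by
  induction pre with
  | nil => simp
  | cons a l ih => simp [ih]

lemma pvGet_append (pre : List PvBlock) (x : PvBlock) (t : List PvBlock) :
    PySem.List.pyGet? (pre ++ x :: t) (pre.length : Int) = some x := by
  rw [PySem.List.pyGet?_natCast]
  simp

lemma pvFixAll_false (r : List (Int × Int)) (pre : List PvBlock) :
    (pvStarts (pre.length : Int) r).foldl pvFix (pre ++ pvBuild r)
      = pre ++ pvCore r false := by
  induction r generalizing pre with
  | nil => simp [pvStarts, pvBuild, pvCore]
  | cons p r ih =>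
      obtain ⟨n, u⟩ := p
      by_cases h : 0 < n
      · have hrep : List.replicate n.toNat (get_resnet_basicblock_one_layer u)
            = get_resnet_basicblock_one_layer u ::
              List.replicate (n - 1).toNat (get_resnet_basicblock_one_layer u) := by
          have : n.toNat = (n - 1).toNat + 1 := by omega
          rw [this, List.replicate_succ]
        simp only [pvStarts, pvBuild, h, if_pos, List.foldl_cons, hrep]
        have hfix : pvFix (pre ++ get_resnet_basicblock_one_layer u ::
              (List.replicate (n - 1).toNat (get_resnet_basicblock_one_layer u) ++ pvBuild r))
              (pre.length : Int)
            = pre ++ pvBlk2 u ::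
              (List.replicate (n - 1).toNat (get_resnet_basicblock_one_layer u) ++ pvBuild r) := by
          rw [pvFix, pvGet_append]
          simp only [Int.toNat_natCast]
          rw [pvSetFirstStride2_one_layer, pvSet_append]
        rw [List.cons_append, hfix]
        have hpre : pre ++ pvBlk2 u ::
              (List.replicate (n - 1).toNat (get_resnet_basicblock_one_layer u) ++ pvBuild r)
            = (pre ++ pvBlk2 u :: List.replicate (n - 1).toNat (get_resnet_basicblock_one_layer u))
              ++ pvBuild r := by
          simp [List.append_assoc]
        have hlen : (pre.length : Int) + n
            = (((pre ++ pvBlk2 u ::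
                List.replicate (n - 1).toNat (get_resnet_basicblock_one_layer u)).length : Nat) : Int) := by
          simp [List.length_append, List.length_replicate]
          omega
        rw [hpre, hlen, ih]
        simp [pvCore, h, List.append_assoc]
      · have hn : n.toNat = 0 := by omega
        simp only [pvStarts, pvBuild, h, if_false, hn, List.replicate_zero, List.nil_append]
        rw [ih]
        simp [pvCore, h]

lemma pvFixAll_true (zs : List (Int × Int)) (pre : List PvBlock) :
    ((pvStarts (pre.length : Int) zs).drop 1).foldl pvFix (pre ++ pvBuild zs)
      = pre ++ pvCore zs true := by
  induction zs generalizing pre with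
  | nil => simp [pvStarts, pvBuild, pvCore]
  | cons p r ih =>
      obtain ⟨n, u⟩ := p
      by_cases h : 0 < n
      · have hrep : List.replicate n.toNat (get_resnet_basicblock_one_layer u)
            = get_resnet_basicblock_one_layer u ::
              List.replicate (n - 1).toNat (get_resnet_basicblock_one_layer u) := by
          have : n.toNat = (n - 1).toNat + 1 := by omega
          rw [this, List.replicate_succ]
        simp only [pvStarts, pvBuild, h, if_pos, List.drop_succ_cons, List.drop_zero]
        have hpre : pre ++ List.replicate n.toNat (get_resnet_basicblock_one_layer u) ++ pvBuild r
            = (pre ++ List.replicate n.toNat (get_resnet_basicblock_one_layer u)) ++ pvBuild r := by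
          simp [List.append_assoc]
        have hlen : (pre.length : Int) + n
            = (((pre ++ List.replicate n.toNat (get_resnet_basicblock_one_layer u)).length : Nat) : Int) := by
          simp [List.length_append, List.length_replicate]
          omega
        rw [← List.append_assoc, hlen, pvFixAll_false]
        simp [pvCore, h, hrep, List.append_assoc]
      · have hn : n.toNat = 0 := by omega
        simp only [pvStarts, pvBuild, h, if_false, hn, List.replicate_zero, List.nil_append]
        rw [ih]
        simp [pvCore, h]

-- ===== VERDICT (by name: the statement is the Claim_ definition above) =====
theorem get_resnet_basicblock_spec : Claim_equal_get_resnet_basicblock := by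
  intro num_layers num_units _
  unfold Spec_get_resnet_basicblock get_resnet_basicblock get_resnet_basicblock_alt
  rw [pvA_fold, pvB_fold]
  have := pvFixAll_true (num_layers.zip num_units) []
  simp only [List.length_nil, Nat.cast_zero, List.nil_append] at this ⊢
  exact this.symm
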